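-- pv_equiv track=rewrite | github.com/NivKonst/Actively-Secure-Vector-OLE | Vector_OLE.py | fill_diagonal_neighbors
-- ===== SOURCE A (Python) =====
-- def fill_diagonal_neighbors(M_neighbors,matrix_cols):
--     (rows_neighbors,data_neighbors)=M_neighbors;
--     rows=len(rows_neighbors);
--     rows_permutation=list(range(0,rows));
--     current_row_index=0;
--     for j in range(0,matrix_cols):
--         found=False;
--         for i in range(current_row_index,rows):
--             current_row=rows_neighbors[i];
--             current_row_len=len(current_row);
--             found=current_row_len>0 and current_row[0]==j;
--             if found:
--                 break;
--         if found:
--             if current_row_index!=i: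
--                 temp=rows_neighbors[current_row_index];
--                 rows_neighbors[current_row_index]=rows_neighbors[i];
--                 rows_neighbors[i]=temp;
--
--                 temp=data_neighbors[current_row_index];
--                 data_neighbors[current_row_index]=data_neighbors[i];
--                 data_neighbors[i]=temp;
--
--                 temp=rows_permutation[current_row_index];
--                 rows_permutation[current_row_index]=rows_permutation[i];
--                 rows_permutation[i]=temp;
--             current_row_index+=1;
--     return (M_neighbors,rows_permutation);
-- ===== SOURCE B (Python) =====
-- def fill_diagonal_neighbors(M_neighbors, matrix_cols):
--     (rows_neighbors, data_neighbors) = M_neighbors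
--     rows = len(rows_neighbors)
--     orig_rows = list(rows_neighbors)
--     orig_data = list(data_neighbors)
--     # bucket the row ids by their leading column index (a row's head never changes)
--     buckets = {}
--     for rid in range(rows):
--         r = orig_rows[rid]
--         if r:
--             buckets.setdefault(r[0], []).append(rid)
--     perm = list(range(rows))          # perm[p] = original id of the row now at position p
--     pos = list(range(rows))           # pos[rid] = current position of original row rid
--     c = 0
--     for j in sorted(e for e in buckets if 0 <= e < matrix_cols):
--         rid = min(buckets[j], key=lambda r: pos[r])
--         i = pos[rid]
--         if i != c:
--             other = perm[c]
--             perm[c] = rid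
--             perm[i] = other
--             pos[other] = i
--             pos[rid] = c
--         c += 1
--     rows_neighbors[:] = [orig_rows[r] for r in perm]
--     data_neighbors[:rows] = [orig_data[r] for r in perm]
--     return (M_neighbors, perm)
-- ===== Notes on version B (the rewrite author's own statement) =====
-- stated objective: faster
-- what changed: Instead of scanning all remaining rows for every one of matrix_cols columns, B buckets row ids by their leading column index once, iterates only over the sorted distinct leading indices present, picks each matched row as the minimum-position element of its bucket via an explicitly maintained position/permutation pair, and applies the resulting permutation to the rows and data at the end.
-- outside the precondition, e.g. on fill_diagonal_neighbors(([[0]], []), 1): A returns (([[0]], []), [0]), B raises IndexError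
import Mathlib
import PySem

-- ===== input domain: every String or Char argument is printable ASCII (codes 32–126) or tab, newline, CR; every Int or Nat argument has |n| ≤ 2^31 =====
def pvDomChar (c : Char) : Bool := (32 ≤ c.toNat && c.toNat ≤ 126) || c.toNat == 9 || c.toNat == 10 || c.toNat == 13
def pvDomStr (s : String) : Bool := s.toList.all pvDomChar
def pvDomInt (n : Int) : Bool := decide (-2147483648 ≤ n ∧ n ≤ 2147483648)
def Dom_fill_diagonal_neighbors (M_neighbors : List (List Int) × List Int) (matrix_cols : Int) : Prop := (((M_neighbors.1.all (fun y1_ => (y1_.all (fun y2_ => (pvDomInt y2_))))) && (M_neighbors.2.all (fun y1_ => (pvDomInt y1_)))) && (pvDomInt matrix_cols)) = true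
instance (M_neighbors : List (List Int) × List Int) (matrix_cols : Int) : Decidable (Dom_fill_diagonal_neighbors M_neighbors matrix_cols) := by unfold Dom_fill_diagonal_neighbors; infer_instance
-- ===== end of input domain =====

-- B replaces A's scan of all remaining rows for each of the matrix_cols columns by one bucketing
-- pass over the rows plus a loop over the sorted distinct leading indices, maintaining an explicit
-- position/permutation pair (objective: faster).  Both Pythons reorder the input lists in place and
-- return them; the equivalence proved here is about the RETURN value (B performs the same mutation).

-- ===== PORT A =====

-- inner 'for i in range(current_row_index, rows): … break' loop of A
def fdnFind (rn : List (List Int)) (j : Int) : List Int → Option Int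
  | [] => none
  | i :: rest =>
    let row := PySem.List.pyGetD rn i []
    if 0 < row.length ∧ PySem.List.pyGetD row 0 0 = j then some i
    else fdnFind rn j rest

-- 'temp = l[c]; l[c] = l[i]; l[i] = temp'
def fdnSwap {α : Type} (l : List α) (d : α) (c i : Int) : List α :=
  let t := PySem.List.pyGetD l c d
  let l1 := PySem.List.pySetD l c (PySem.List.pyGetD l i d)
  PySem.List.pySetD l1 i t

-- one iteration of A's outer 'for j in range(0, matrix_cols)' loop;
-- state = ((rows_neighbors, data_neighbors, rows_permutation), current_row_index)
def fdnStepA (rows : Int) (st : (List (List Int) × List Int × List Int) × Int) (j : Int) :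
    (List (List Int) × List Int × List Int) × Int :=
  match fdnFind st.1.1 j (PySem.List.pyRange st.2 rows 1) with
  | none => st
  | some i =>
    if st.2 ≠ i then
      ((fdnSwap st.1.1 [] st.2 i, fdnSwap st.1.2.1 0 st.2 i, fdnSwap st.1.2.2 0 st.2 i), st.2 + 1)
    else ((st.1.1, st.1.2.1, st.1.2.2), st.2 + 1)

def fill_diagonal_neighbors (M_neighbors : List (List Int) × List Int) (matrix_cols : Int) :
    (List (List Int) × List Int) × List Int :=
  let rows : Int := PySem.List.len M_neighbors.1
  let st := (PySem.List.pyRange 0 matrix_cols 1).foldl (fdnStepA rows)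
      ((M_neighbors.1, M_neighbors.2, PySem.List.pyRange 0 rows 1), 0)
  ((st.1.1, st.1.2.1), st.1.2.2)

-- ===== PORT B =====

-- 'buckets.setdefault(r[0], []).append(rid)' grouping pass of Source B
def fdnBuckets (origR : List (List Int)) : PySem.Dict Int (List Int) :=
  (PySem.List.pyRange 0 (PySem.List.len origR) 1).foldl
    (fun d rid =>
      if 0 < (PySem.List.pyGetD origR rid []).length then
        d.modify (PySem.List.pyGetD (PySem.List.pyGetD origR rid []) 0 0) [] (· ++ [rid])
      else d)
    PySem.Dict.empty

-- one iteration of Source B's 'for j in sorted(…)' loop; state = (perm, pos, c)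
def fdnStepB (buckets : PySem.Dict Int (List Int)) (st : List Int × List Int × Int) (j : Int) :
    List Int × List Int × Int :=
  match PySem.List.min? (buckets.getD j []) (fun r => PySem.List.pyGetD st.2.1 r 0) with
  | none => st  -- unreachable: buckets holds a nonempty list for every key
  | some rid =>
    let i := PySem.List.pyGetD st.2.1 rid 0
    if i ≠ st.2.2 then
      let other := PySem.List.pyGetD st.1 st.2.2 0
      ((PySem.List.pySetD (PySem.List.pySetD st.1 st.2.2 rid) i other),
       (PySem.List.pySetD (PySem.List.pySetD st.2.1 other i) rid st.2.2), st.2.2 + 1)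
    else (st.1, st.2.1, st.2.2 + 1)

def fill_diagonal_neighbors_alt (M_neighbors : List (List Int) × List Int) (matrix_cols : Int) :
    (List (List Int) × List Int) × List Int :=
  let origR := M_neighbors.1
  let origD := M_neighbors.2
  let rows : Int := PySem.List.len origR
  let buckets := fdnBuckets origR
  let js := PySem.List.sorted
      ((buckets.keys).filter (fun e => decide (0 ≤ e) && decide (e < matrix_cols))) (fun x => x) false
  let st := js.foldl (fdnStepB buckets) (PySem.List.pyRange 0 rows 1, PySem.List.pyRange 0 rows 1, 0)
  ((st.1.map (fun r => PySem.List.pyGetD origR r []),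
    st.1.map (fun r => PySem.List.pyGetD origD r 0) ++ origD.drop origR.length), st.1)

-- ===== PRECONDITION & SPEC =====
-- Pre_ excludes inputs whose data list is shorter than the rows list: there the parallel-array
-- representation is broken — A raises IndexError at the first cross swap (and the value it returns
-- when no swap happens to reach past the data list is accidental), and B raises IndexError.
def Pre_fill_diagonal_neighbors (M_neighbors : List (List Int) × List Int) (matrix_cols : Int) : Prop :=
  M_neighbors.1.length ≤ M_neighbors.2.length
instance (M_neighbors : List (List Int) × List Int) (matrix_cols : Int) : Decidable (Pre_fill_diagonal_neighbors M_neighbors matrix_cols) := by unfold Pre_fill_diagonal_neighbors; infer_instance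
def pvWitness_fill_diagonal_neighbors : (List (List Int) × List Int) × Int := (([[1], [0]], [7, 8]), 2)

def Spec_fill_diagonal_neighbors (M_neighbors : List (List Int) × List Int) (matrix_cols : Int) (out : (List (List Int) × List Int) × List Int) : Prop := out = fill_diagonal_neighbors_alt M_neighbors matrix_cols
instance (M_neighbors : List (List Int) × List Int) (matrix_cols : Int) (out : (List (List Int) × List Int) × List Int) : Decidable (Spec_fill_diagonal_neighbors M_neighbors matrix_cols out) := by unfold Spec_fill_diagonal_neighbors; infer_instance

-- ===== CLAIM (what is proved, stated in full; the proofs are below) =====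
def Claim_equal_fill_diagonal_neighbors : Prop := ∀ (M_neighbors : List (List Int) × List Int) (matrix_cols : Int), Dom_fill_diagonal_neighbors M_neighbors matrix_cols → Pre_fill_diagonal_neighbors M_neighbors matrix_cols → Spec_fill_diagonal_neighbors M_neighbors matrix_cols (fill_diagonal_neighbors M_neighbors matrix_cols)

-- ===== LEMMAS AND PROOFS =====

-- abbreviations used only by the proofs
def fdnRowOf (origR : List (List Int)) (r : Int) : List Int := PySem.List.pyGetD origR r []
def fdnDatOf (origD : List Int) (r : Int) : Int := PySem.List.pyGetD origD r 0

-- the A-side state determined by a permutation (as a list of original row ids) and a cursor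
def fdnAState (origR : List (List Int)) (origD : List Int) (perm : List Int) (c : Nat) :
    (List (List Int) × List Int × List Int) × Int :=
  ((perm.map (fdnRowOf origR),
    perm.map (fdnDatOf origD) ++ origD.drop origR.length,
    perm), (c : Int))

-- loop invariant tying A's state to B's (perm, pos, c) while the columns of L are still to come
structure FdnInv (origR : List (List Int)) (cols a : Int) (perm pos : List Int) (c : Nat)
    (L : List Int) : Prop where
  h1 : perm.length = origR.length
  h2 : pos.length = origR.length
  h3 : c ≤ origR.length
  h4 : ∀ p : Nat, p < origR.length → 0 ≤ perm.getD p 0 ∧ perm.getD p 0 < origR.length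
  h5 : ∀ p : Nat, p < origR.length → pos.getD (perm.getD p 0).toNat 0 = (p : Int)
  h6 : ∀ r : Nat, r < origR.length → 0 ≤ pos.getD r 0 ∧ pos.getD r 0 < origR.length
  h7 : ∀ r : Nat, r < origR.length → perm.getD (pos.getD r 0).toNat 0 = (r : Int)
  h8 : L.Pairwise (· < ·)
  h9 : ∀ e ∈ L, a ≤ e ∧ e < cols ∧ ∃ r : Nat, r < origR.length ∧ (origR.getD r []).head? = some e
  h10 : ∀ r : Nat, r < origR.length → ∀ e : Int, (origR.getD r []).head? = some e → a ≤ e →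
        e < cols → (c : Int) ≤ pos.getD r 0 ∧ e ∈ L

-- getD facts about set
theorem fdnGetD_set_self {α : Type} (l : List α) (i : Nat) (a d : α) (h : i < l.length) :
    (l.set i a).getD i d = a := by
  rw [List.getD_eq_getElem _ _ (by simpa using h)]
  exact List.getElem_set_self (by simpa using h)

theorem fdnGetD_set_ne {α : Type} (l : List α) (i j : Nat) (a d : α) (h : i ≠ j) :
    (l.set i a).getD j d = l.getD j d := by
  by_cases hj : j < l.length
  · rw [List.getD_eq_getElem _ _ (by simpa using hj), List.getD_eq_getElem _ _ hj]
    simp [h]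
  · have h1 : l.length ≤ j := by omega
    simp [List.getD, List.getElem?_eq_none h1,
      List.getElem?_eq_none (show (l.set i a).length ≤ j by simpa using h1)]

-- getD through a double set (a swap write)
theorem fdnGetD_set2 {α : Type} (l : List α) (c i p : Nat) (x y d : α)
    (hc : c < l.length) (hi : i < l.length) :
    ((l.set c x).set i y).getD p d =
      if p = i then y else if p = c then x else l.getD p d := by
  by_cases hpi : p = i
  · subst hpi
    rw [if_pos rfl, fdnGetD_set_self _ _ _ _ (by simpa using hi)]
  · rw [if_neg hpi, fdnGetD_set_ne _ _ _ _ _ (fun h => hpi h.symm)]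
    by_cases hpc : p = c
    · subst hpc
      rw [if_pos rfl, fdnGetD_set_self _ _ _ _ hc]
    · rw [if_neg hpc, fdnGetD_set_ne _ _ _ _ _ (fun h => hpc h.symm)]

-- getD through map
theorem fdnGetD_map {α β : Type} (f : α → β) (l : List α) (p : Nat) (d : β) (d0 : α)
    (h : p < l.length) : (l.map f).getD p d = f (l.getD p d0) := by
  rw [List.getD_eq_getElem _ _ (by simpa using h), List.getD_eq_getElem _ _ h, List.getElem_map]

-- getD on a range
theorem fdnGetD_pyRange (n p : Nat) (h : p < n) :
    (PySem.List.pyRange 0 (n : Int) 1).getD p 0 = (p : Int) := by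
  have hlen : p < (PySem.List.pyRange 0 (n : Int) 1).length := by
    rw [PySem.List.length_pyRange_one]; omega
  rw [List.getD_eq_getElem _ _ hlen, PySem.List.getElem_pyRange_one]
  simp

-- A's guard 'len(row) > 0 and row[0] == j' is head? = some j
theorem fdnMatch_iff (row : List Int) (j : Int) :
    (0 < row.length ∧ PySem.List.pyGetD row 0 0 = j) ↔ row.head? = some j := by
  cases row <;> simp [PySem.List.pyGetD, PySem.List.pyGet?, PySem.List.pyIdx?]

-- the swap helper on valid Nat indices
theorem fdnSwap_natCast {α : Type} (l : List α) (d : α) (c i : Nat)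
    (hc : c < l.length) (hi : i < l.length) :
    fdnSwap l d (c : Int) (i : Int) = (l.set c (l.getD i d)).set i (l.getD c d) := by
  unfold fdnSwap
  rw [PySem.List.pyGetD_natCast, PySem.List.pyGetD_natCast, PySem.List.pySetD_natCast,
    PySem.List.pySetD_natCast]

-- swapping inside the left part of an append
theorem fdnSwap_append {α : Type} (A B : List α) (d : α) (c i : Nat)
    (hc : c < A.length) (hi : i < A.length) :
    fdnSwap (A ++ B) d (c : Int) (i : Int) = fdnSwap A d (c : Int) (i : Int) ++ B := by
  rw [fdnSwap_natCast _ _ _ _ (by simp; omega) (by simp; omega), fdnSwap_natCast _ _ _ _ hc hi]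
  rw [List.getD_eq_getElem _ _ (by simp; omega), List.getElem_append_left hi,
      List.getD_eq_getElem _ _ (by simp; omega), List.getElem_append_left hc]
  rw [List.set_append, if_pos hc, List.set_append, if_pos (by simpa using hi)]
  rw [List.getD_eq_getElem _ _ hi, List.getD_eq_getElem _ _ hc]

-- grouping fold: contents of one bucket
theorem fdnGroupfold_getD (origR : List (List Int)) (l : List Int)
    (d : PySem.Dict Int (List Int)) (j : Int) :
    (l.foldl (fun d rid =>
      if 0 < (PySem.List.pyGetD origR rid []).length then
        d.modify (PySem.List.pyGetD (PySem.List.pyGetD origR rid []) 0 0) [] (· ++ [rid])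
      else d) d).getD j [] =
      d.getD j [] ++ l.filter (fun rid => (PySem.List.pyGetD origR rid []).head? == some j) := by
  induction l generalizing d with
  | nil => simp
  | cons x t ih =>
    rw [List.foldl_cons, List.filter_cons]
    rcases hrow : PySem.List.pyGetD origR x [] with _ | ⟨a, s⟩
    · simp only [List.length_nil]
      rw [if_neg (by omega)]
      rw [ih]
      simp
    · rw [if_pos (by simp)]
      have hkey : PySem.List.pyGetD (a :: s) 0 0 = a := by
        simp [PySem.List.pyGetD, PySem.List.pyGet?, PySem.List.pyIdx?]
      rw [hkey, ih]
      by_cases haj : a = j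
      · subst haj
        rw [PySem.Dict.getD_modify_self]
        simp
      · rw [PySem.Dict.getD_modify_of_ne _ _ _ (fun h => haj h.symm)]
        simp [haj]

-- membership in the keys of the grouping fold
theorem fdnGroupfold_keys (origR : List (List Int)) (l : List Int)
    (d : PySem.Dict Int (List Int)) (j : Int) :
    j ∈ (l.foldl (fun d rid =>
      if 0 < (PySem.List.pyGetD origR rid []).length then
        d.modify (PySem.List.pyGetD (PySem.List.pyGetD origR rid []) 0 0) [] (· ++ [rid])
      else d) d).keys ↔
      j ∈ d.keys ∨ ∃ x ∈ l, (PySem.List.pyGetD origR x []).head? = some j := by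
  induction l generalizing d with
  | nil => simp
  | cons x t ih =>
    rw [List.foldl_cons, ih]
    rcases hrow : PySem.List.pyGetD origR x [] with _ | ⟨a, s⟩
    · simp only [List.length_nil]
      rw [if_neg (by omega)]
      simp [hrow]
    · rw [if_pos (by simp)]
      have hkey : PySem.List.pyGetD (a :: s) 0 0 = a := by
        simp [PySem.List.pyGetD, PySem.List.pyGet?, PySem.List.pyIdx?]
      rw [hkey]
      rw [PySem.Dict.keys_modify, PySem.Dict.mem_keys_insert]
      constructor
      · rintro ((h | h) | ⟨y, hy, hhy⟩)
        · exact Or.inr ⟨x, List.mem_cons_self, by simp [hrow, h]⟩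
        · exact Or.inl h
        · exact Or.inr ⟨y, List.mem_cons_of_mem _ hy, hhy⟩
      · rintro (h | ⟨y, hy, hhy⟩)
        · exact Or.inl (Or.inr h)
        · rcases List.mem_cons.mp hy with h | h
          · subst h
            rw [hrow] at hhy
            exact Or.inl (Or.inl (by simpa using hhy.symm))
          · exact Or.inr ⟨y, h, hhy⟩

-- the keys of the grouping fold stay distinct
theorem fdnGroupfold_nodup (origR : List (List Int)) (l : List Int)
    (d : PySem.Dict Int (List Int)) (h : d.keys.Nodup) :
    (l.foldl (fun d rid =>
      if 0 < (PySem.List.pyGetD origR rid []).length then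
        d.modify (PySem.List.pyGetD (PySem.List.pyGetD origR rid []) 0 0) [] (· ++ [rid])
      else d) d).keys.Nodup := by
  induction l generalizing d with
  | nil => exact h
  | cons x t ih =>
    rw [List.foldl_cons]
    split_ifs with hx
    · refine ih _ ?_
      rw [PySem.Dict.keys_modify]
      exact PySem.Dict.nodup_keys_insert _ _ _ h
    · exact ih _ h

theorem fdnBuckets_getD (origR : List (List Int)) (j : Int) :
    (fdnBuckets origR).getD j [] =
      (PySem.List.pyRange 0 (PySem.List.len origR) 1).filter
        (fun rid => (PySem.List.pyGetD origR rid []).head? == some j) := by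
  unfold fdnBuckets
  rw [fdnGroupfold_getD]
  simp

theorem fdnBuckets_keys_mem (origR : List (List Int)) (j : Int) :
    j ∈ (fdnBuckets origR).keys ↔
      ∃ r : Nat, r < origR.length ∧ (origR.getD r []).head? = some j := by
  unfold fdnBuckets
  rw [fdnGroupfold_keys]
  simp only [PySem.Dict.keys_empty, List.not_mem_nil, false_or]
  constructor
  · rintro ⟨x, hx, hhx⟩
    rw [PySem.List.mem_pyRange_one] at hx
    simp only [PySem.List.len_eq] at hx
    rw [PySem.List.pyGetD_of_nonneg _ _ (by omega)] at hhx
    exact ⟨x.toNat, by omega, hhx⟩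
  · rintro ⟨r, hr, hhr⟩
    refine ⟨(r : Int), ?_, ?_⟩
    · rw [PySem.List.mem_pyRange_one]
      simp only [PySem.List.len_eq]
      omega
    · rw [PySem.List.pyGetD_natCast]
      exact hhr

theorem fdnBuckets_keys_nodup (origR : List (List Int)) : (fdnBuckets origR).keys.Nodup := by
  unfold fdnBuckets
  exact fdnGroupfold_nodup _ _ _ (by simp [PySem.Dict.keys_empty])

theorem fdnJs_eq (origR : List (List Int)) (cols : Int) :
    PySem.List.sorted (((fdnBuckets origR).keys).filter
        (fun e => decide (0 ≤ e) && decide (e < cols))) (fun x => x) false =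
      (PySem.List.pyRange 0 cols 1).filter
        (fun e => decide (∃ r : Nat, r < origR.length ∧ (origR.getD r []).head? = some e)) := by
  apply PySem.List.sorted_eq_of_perm_of_pairwise_lt
  · rw [List.perm_ext_iff_of_nodup
      ((PySem.List.nodup_pyRange_one 0 cols).filter _)
      ((fdnBuckets_keys_nodup origR).filter _)]
    intro e
    simp only [List.mem_filter, PySem.List.mem_pyRange_one, Bool.and_eq_true,
      decide_eq_true_eq]
    constructor
    · rintro ⟨⟨h1, h2⟩, h3⟩
      exact ⟨(fdnBuckets_keys_mem origR e).mpr h3, h1, h2⟩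
    · rintro ⟨hk, h1, h2⟩
      exact ⟨⟨h1, h2⟩, (fdnBuckets_keys_mem origR e).mp hk⟩
  · exact (PySem.List.pairwise_lt_pyRange_one 0 cols).filter _

-- A's inner scan returns none when nothing matches
theorem fdnFind_eq_none (rn : List (List Int)) (j : Int) (l : List Int)
    (h : ∀ i ∈ l, ¬(0 < (PySem.List.pyGetD rn i []).length ∧
        PySem.List.pyGetD (PySem.List.pyGetD rn i []) 0 0 = j)) :
    fdnFind rn j l = none := by
  induction l with
  | nil => rfl
  | cons i t ih =>
    show fdnFind rn j (i :: t) = none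
    unfold fdnFind
    rw [if_neg (h i (List.mem_cons_self))]
    exact ih (fun i' hi' => h i' (List.mem_cons_of_mem _ hi'))

-- A's inner scan finds the first matching index
theorem fdnFind_eq_some (rn : List (List Int)) (j : Int) (n i : Int) (k : Nat) :
    ∀ c : Int, (i - c).toNat = k → c ≤ i → i < n →
    (0 < (PySem.List.pyGetD rn i []).length ∧
      PySem.List.pyGetD (PySem.List.pyGetD rn i []) 0 0 = j) →
    (∀ i' : Int, c ≤ i' → i' < i → ¬(0 < (PySem.List.pyGetD rn i' []).length ∧
        PySem.List.pyGetD (PySem.List.pyGetD rn i' []) 0 0 = j)) →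
    fdnFind rn j (PySem.List.pyRange c n 1) = some i := by
  induction k with
  | zero =>
    intro c hk hci hin hm _
    have hic : c = i := by omega
    subst hic
    rw [PySem.List.pyRange_one_cons (by omega)]
    unfold fdnFind
    rw [if_pos hm]
  | succ k ih =>
    intro c hk hci hin hm hmin
    have hclt : c < i := by omega
    rw [PySem.List.pyRange_one_cons (by omega)]
    unfold fdnFind
    rw [if_neg (hmin c le_rfl hclt)]
    exact ih (c + 1) (by omega) (by omega) hin hm
      (fun i' h1 h2 => hmin i' (by omega) h2)

-- when no live row starts with column a, A's step is the identity
theorem fdnStepA_id (origR : List (List Int)) (origD : List Int) (cols a : Int)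
    (perm pos : List Int) (c : Nat) (L : List Int)
    (inv : FdnInv origR cols a perm pos c L) (hnotin : a ∉ L) (hacols : a < cols) :
    fdnStepA ((origR.length : Int)) (fdnAState origR origD perm c) a =
      fdnAState origR origD perm c := by
  have hfind : fdnFind (perm.map (fdnRowOf origR)) a
      (PySem.List.pyRange (c : Int) ((origR.length : Int)) 1) = none := by
    apply fdnFind_eq_none
    intro i hi hmatch
    rw [PySem.List.mem_pyRange_one] at hi
    have hi0 : 0 ≤ i := by omega
    have hilen : i.toNat < origR.length := by omega
    rw [PySem.List.pyGetD_of_nonneg _ _ hi0] at hmatch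
    rw [fdnGetD_map _ _ _ _ 0 (by rw [inv.h1]; exact hilen)] at hmatch
    rw [fdnMatch_iff] at hmatch
    unfold fdnRowOf at hmatch
    have hrb := inv.h4 i.toNat hilen
    rw [PySem.List.pyGetD_of_nonneg _ _ hrb.1] at hmatch
    have := (inv.h10 (perm.getD i.toNat 0).toNat (by omega) a hmatch le_rfl hacols).2
    exact hnotin this
  unfold fdnStepA
  rw [show (fdnAState origR origD perm c).1.1 = perm.map (fdnRowOf origR) from rfl,
      show (fdnAState origR origD perm c).2 = ((c : Nat) : Int) from rfl, hfind]

-- the matched step: B's bucket/min step performs exactly A's scan-and-swap step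
theorem fdnStep_matched (origR : List (List Int)) (origD : List Int) (cols a : Int)
    (perm pos : List Int) (c : Nat) (L' : List Int)
    (inv : FdnInv origR cols a perm pos c (a :: L')) :
    ∃ perm' pos' : List Int,
      fdnStepB (fdnBuckets origR) (perm, pos, (c : Int)) a = (perm', pos', ((c + 1 : Nat) : Int)) ∧
      fdnStepA ((origR.length : Int)) (fdnAState origR origD perm c) a =
        fdnAState origR origD perm' (c + 1) ∧
      FdnInv origR cols (a + 1) perm' pos' (c + 1) L' := by
  obtain ⟨-, hacols, r0, hr0n, hr0hd⟩ := inv.h9 a (List.mem_cons_self)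
  have hn := inv.h1
  -- the bucket for column a
  have hbk := fdnBuckets_getD origR a
  have hbkmem : ∀ x : Int, x ∈ (fdnBuckets origR).getD a [] ↔
      (0 ≤ x ∧ x < (origR.length : Int) ∧ (origR.getD x.toNat []).head? = some a) := by
    intro x
    rw [hbk, List.mem_filter, PySem.List.mem_pyRange_one]
    simp only [PySem.List.len_eq]
    constructor
    · rintro ⟨⟨hx0, hxn⟩, hpred⟩
      rw [PySem.List.pyGetD_of_nonneg _ _ hx0] at hpred
      exact ⟨hx0, hxn, by simpa using hpred⟩
    · rintro ⟨hx0, hxn, hhd⟩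
      refine ⟨⟨hx0, hxn⟩, ?_⟩
      rw [PySem.List.pyGetD_of_nonneg _ _ hx0]
      simpa using hhd
  -- the bucket is nonempty, so min? finds its first minimal element m
  have hne : (fdnBuckets origR).getD a [] ≠ [] := by
    intro hempty
    have := (hbkmem (r0 : Int)).mpr ⟨by omega, by omega, by simpa using hr0hd⟩
    rw [hempty] at this
    exact List.not_mem_nil this
  obtain ⟨m, hminEq⟩ : ∃ m, PySem.List.min? ((fdnBuckets origR).getD a [])
      (fun r => PySem.List.pyGetD pos r 0) = some m := by
    rcases h : PySem.List.min? ((fdnBuckets origR).getD a [])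
        (fun r => PySem.List.pyGetD pos r 0) with _ | m
    · exact absurd ((PySem.List.min?_eq_none_iff _ _).mp h) hne
    · exact ⟨m, rfl⟩
  have hmmem := (hbkmem m).mp (PySem.List.min?_mem hminEq)
  obtain ⟨hm0, hmn, hmhd⟩ := hmmem
  have hmin := PySem.List.min?_isMin hminEq
  set rM : Nat := m.toNat with hrM
  have hmcast : m = (rM : Int) := by omega
  -- i* = pos[rM], the current position of the matched row
  have hi6 := inv.h6 rM (by omega)
  set iN : Nat := (pos.getD rM 0).toNat with hiN
  have hposrM : pos.getD rM 0 = (iN : Int) := by omega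
  have hiNn : iN < origR.length := by omega
  -- the matched row is live: c ≤ iN
  have hlive := (inv.h10 rM (by omega) a (by simpa using hmhd) le_rfl hacols).1
  have hciN : c ≤ iN := by omega
  -- perm[iN] = m
  have hpermiN : perm.getD iN 0 = (rM : Int) := by
    have := inv.h7 rM (by omega)
    rw [hposrM] at this
    simpa using this
  -- A's scan finds exactly iN
  have hfind : fdnFind (perm.map (fdnRowOf origR)) a
      (PySem.List.pyRange (c : Int) ((origR.length : Int)) 1) = some (iN : Int) := by
    apply fdnFind_eq_some _ _ _ _ ((iN : Int) - (c : Int)).toNat _ rfl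
      (by omega) (by omega)
    · rw [PySem.List.pyGetD_of_nonneg _ _ (by omega : (0:Int) ≤ (iN : Int))]
      rw [fdnGetD_map _ _ _ _ 0 (by omega)]
      rw [fdnMatch_iff]
      unfold fdnRowOf
      simp only [Int.toNat_natCast]
      rw [hpermiN, PySem.List.pyGetD_natCast]
      exact hmhd
    · intro i' h1 h2 hmatch
      have hi'0 : 0 ≤ i' := by omega
      have hi'n : i'.toNat < origR.length := by omega
      rw [PySem.List.pyGetD_of_nonneg _ _ hi'0] at hmatch
      rw [fdnGetD_map _ _ _ _ 0 (by omega)] at hmatch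
      rw [fdnMatch_iff] at hmatch
      unfold fdnRowOf at hmatch
      have hrb := inv.h4 i'.toNat hi'n
      rw [PySem.List.pyGetD_of_nonneg _ _ hrb.1] at hmatch
      -- the row id at position i' is in the bucket, so its position is ≥ iN
      have hbmem : (perm.getD i'.toNat 0) ∈ (fdnBuckets origR).getD a [] :=
        (hbkmem _).mpr ⟨hrb.1, hrb.2, hmatch⟩
      have := hmin _ hbmem
      rw [PySem.List.pyGetD_of_nonneg _ _ hrb.1] at this
      rw [inv.h5 i'.toNat hi'n] at this
      rw [PySem.List.pyGetD_of_nonneg _ _ hm0] at this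
      rw [hposrM] at this
      omega
  have hcn : c < origR.length := by omega
  -- membership in L' for still-pending columns
  have hLmem : ∀ e : Int, e ∈ (a :: L') → a + 1 ≤ e → e ∈ L' := by
    intro e he hae
    rcases List.mem_cons.mp he with h | h
    · omega
    · exact h
  have hLmem9 : ∀ e ∈ L', a + 1 ≤ e ∧ e < cols ∧
      ∃ r : Nat, r < origR.length ∧ (origR.getD r []).head? = some e := by
    intro e he
    obtain ⟨h1, h2, h3⟩ := inv.h9 e (List.mem_cons_of_mem _ he)
    have hae : a < e := (List.pairwise_cons.mp inv.h8).1 e he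
    exact ⟨by omega, h2, h3⟩
  by_cases hic : iN = c
  · -- the matched row is already at the cursor: no swap on either side
    refine ⟨perm, pos, ?_, ?_, ?_⟩
    · unfold fdnStepB
      try dsimp only
      rw [hminEq]
      try dsimp only
      rw [PySem.List.pyGetD_of_nonneg _ _ hm0]
      rw [show m.toNat = rM from rfl, hposrM]
      rw [if_neg (by simp [hic] : ¬((iN : Int) ≠ ((c:Nat) : Int)))]
      norm_cast
    · unfold fdnStepA
      rw [show (fdnAState origR origD perm c).1.1 = perm.map (fdnRowOf origR) from rfl,
          show (fdnAState origR origD perm c).2 = ((c : Nat) : Int) from rfl, hfind]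
      try dsimp only
      rw [if_neg (by simp [hic] : ¬(((c:Nat) : Int) ≠ (iN : Int)))]
      unfold fdnAState
      norm_cast
    · refine ⟨inv.h1, inv.h2, by omega, inv.h4, inv.h5, inv.h6, inv.h7,
        (List.pairwise_cons.mp inv.h8).2, hLmem9, ?_⟩
      intro r hrn e hhd hae hecols
      obtain ⟨hc1, hc2⟩ := inv.h10 r hrn e hhd (by omega) hecols
      refine ⟨?_, hLmem e hc2 hae⟩
      by_contra hlt
      push_neg at hlt
      have hposr : pos.getD r 0 = (c : Int) := by omega
      have h7r := inv.h7 r hrn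
      rw [hposr] at h7r
      simp only [Int.toNat_natCast] at h7r
      rw [hic] at hpermiN
      rw [hpermiN] at h7r
      have hrrM : r = rM := by omega
      rw [hrrM, hmhd] at hhd
      have : e = a := by simpa using hhd.symm
      omega
  · -- genuine swap at positions c and iN
    have hciN' : c < iN := by omega
    have hob := inv.h4 c hcn
    set other : Int := perm.getD c 0 with hother
    set oN : Nat := other.toNat with hoN
    have hocast : other = (oN : Int) := by omega
    have hposoN : pos.getD oN 0 = (c : Int) := by
      have := inv.h5 c hcn
      rw [← hother] at this
      exact this
    have hoNrM : oN ≠ rM := by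
      intro h
      rw [h, hposrM] at hposoN
      omega
    set perm' : List Int := (perm.set c ((rM : Nat) : Int)).set iN other with hperm'def
    set pos' : List Int := (pos.set oN ((iN : Nat) : Int)).set rM ((c : Nat) : Int) with hpos'def
    have hlp : perm'.length = origR.length := by simp [hperm'def, inv.h1]
    have hlq : pos'.length = origR.length := by simp [hpos'def, inv.h2]
    have hpermlen : c < perm.length := by omega
    have hpermlen2 : iN < perm.length := by omega
    have hposlen : oN < pos.length := by
      have := inv.h2; omega
    have hposlen2 : rM < pos.length := by
      have := inv.h2; omega
    have hgp : ∀ p : Nat, perm'.getD p 0 =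
        if p = iN then other else if p = c then ((rM : Nat) : Int) else perm.getD p 0 :=
      fun p => fdnGetD_set2 perm c iN p _ _ _ hpermlen hpermlen2
    have hgq : ∀ r : Nat, pos'.getD r 0 =
        if r = rM then ((c : Nat) : Int) else if r = oN then ((iN : Nat) : Int)
        else pos.getD r 0 :=
      fun r => fdnGetD_set2 pos oN rM r _ _ _ hposlen hposlen2
    refine ⟨perm', pos', ?_, ?_, ?_⟩
    · -- B's step
      unfold fdnStepB
      try dsimp only
      rw [hminEq]
      try dsimp only
      rw [PySem.List.pyGetD_of_nonneg _ _ hm0]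
      rw [show m.toNat = rM from rfl, hposrM]
      rw [if_pos (by omega : ((iN : Nat) : Int) ≠ ((c:Nat) : Int))]
      try dsimp only
      rw [PySem.List.pyGetD_natCast, ← hother]
      rw [PySem.List.pySetD_natCast, PySem.List.pySetD_natCast]
      rw [PySem.List.pySetD_of_nonneg _ _ (by omega : (0:Int) ≤ other),
          PySem.List.pySetD_of_nonneg _ _ (by omega : (0:Int) ≤ m)]
      rw [← hoN, show m.toNat = rM from rfl]
      rw [hmcast]
      norm_cast
    · -- A's step
      unfold fdnStepA
      rw [show (fdnAState origR origD perm c).1.1 = perm.map (fdnRowOf origR) from rfl,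
          show (fdnAState origR origD perm c).2 = ((c : Nat) : Int) from rfl, hfind]
      try dsimp only
      rw [if_pos (by omega : ((c:Nat) : Int) ≠ ((iN : Nat) : Int))]
      rw [show (fdnAState origR origD perm c).1.2.1 =
            perm.map (fdnDatOf origD) ++ origD.drop origR.length from rfl,
          show (fdnAState origR origD perm c).1.2.2 = perm from rfl]
      have hmap1 : fdnSwap (perm.map (fdnRowOf origR)) [] ((c:Nat) : Int) ((iN:Nat) : Int) =
          perm'.map (fdnRowOf origR) := by
        rw [fdnSwap_natCast _ _ _ _ (by simpa using hpermlen) (by simpa using hpermlen2)]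
        rw [fdnGetD_map _ _ _ _ 0 hpermlen2, fdnGetD_map _ _ _ _ 0 hpermlen]
        rw [← List.map_set, ← List.map_set, hpermiN, ← hother]
      have hmap2 : fdnSwap (perm.map (fdnDatOf origD) ++ origD.drop origR.length) 0
            ((c:Nat) : Int) ((iN:Nat) : Int) =
          perm'.map (fdnDatOf origD) ++ origD.drop origR.length := by
        rw [fdnSwap_append _ _ _ _ _ (by simpa using hpermlen) (by simpa using hpermlen2)]
        rw [fdnSwap_natCast _ _ _ _ (by simpa using hpermlen) (by simpa using hpermlen2)]
        rw [fdnGetD_map _ _ _ _ 0 hpermlen2, fdnGetD_map _ _ _ _ 0 hpermlen]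
        rw [← List.map_set, ← List.map_set, hpermiN, ← hother]
      have hmap3 : fdnSwap perm 0 ((c:Nat) : Int) ((iN:Nat) : Int) = perm' := by
        rw [fdnSwap_natCast _ _ _ _ hpermlen hpermlen2, hpermiN, ← hother]
      rw [hmap1, hmap2, hmap3]
      unfold fdnAState
      norm_cast
    · -- the invariant survives the swap
      refine ⟨hlp, hlq, by omega, ?_, ?_, ?_, ?_,
        (List.pairwise_cons.mp inv.h8).2, hLmem9, ?_⟩
      · intro p hp
        rw [hgp p]
        split_ifs with h1 h2
        · omega
        · omega
        · exact inv.h4 p hp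
      · intro p hp
        rw [hgp p]
        split_ifs with h1 h2
        · rw [hocast]
          simp only [Int.toNat_natCast]
          rw [hgq oN]
          rw [if_neg hoNrM, if_pos rfl]
          omega
        · simp only [Int.toNat_natCast]
          rw [hgq rM, if_pos rfl]
          omega
        · have hrb := inv.h4 p hp
          set rv := perm.getD p 0 with hrv
          have hrvne1 : rv.toNat ≠ rM := by
            intro h
            have hrvm : rv = (rM : Int) := by omega
            have := inv.h5 p hp
            rw [← hrv, hrvm] at this
            simp only [Int.toNat_natCast] at this
            rw [hposrM] at this
            omega
          have hrvne2 : rv.toNat ≠ oN := by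
            intro h
            have hrvo : rv = (oN : Int) := by omega
            have := inv.h5 p hp
            rw [← hrv, hrvo] at this
            simp only [Int.toNat_natCast] at this
            rw [hposoN] at this
            omega
          rw [hgq rv.toNat, if_neg hrvne1, if_neg hrvne2]
          exact inv.h5 p hp
      · intro r hr
        rw [hgq r]
        split_ifs with h1 h2
        · omega
        · omega
        · exact inv.h6 r hr
      · intro r hr
        rw [hgq r]
        split_ifs with h1 h2
        · simp only [Int.toNat_natCast]
          rw [hgp c, if_neg (by omega : c ≠ iN), if_pos rfl, h1]
        · simp only [Int.toNat_natCast]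
          rw [hgp iN, if_pos rfl, hocast, h2]
        · set q := (pos.getD r 0).toNat with hq
          have hq6 := inv.h6 r hr
          have hqn : q < origR.length := by omega
          have hqne1 : q ≠ iN := by
            intro h
            have hpq : pos.getD r 0 = (iN : Int) := by omega
            have h7r := inv.h7 r hr
            rw [hpq] at h7r
            simp only [Int.toNat_natCast] at h7r
            rw [hpermiN] at h7r
            exact h1 (by omega)
          have hqne2 : q ≠ c := by
            intro h
            have hpq : pos.getD r 0 = (c : Int) := by omega
            have h7r := inv.h7 r hr
            rw [hpq] at h7r
            simp only [Int.toNat_natCast] at h7r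
            rw [← hother] at h7r
            exact h2 (by omega)
          rw [hgp q, if_neg hqne1, if_neg hqne2]
          exact inv.h7 r hr
      · intro r hrn e hhd hae hecols
        obtain ⟨hc1, hc2⟩ := inv.h10 r hrn e hhd (by omega) hecols
        refine ⟨?_, hLmem e hc2 hae⟩
        rw [hgq r]
        split_ifs with h1 h2
        · exfalso
          rw [h1, hmhd] at hhd
          have : e = a := by simpa using hhd.symm
          omega
        · omega
        · by_contra hlt
          push_neg at hlt
          have hposr : pos.getD r 0 = (c : Int) := by omega
          have h7r := inv.h7 r hrn
          rw [hposr] at h7r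
          simp only [Int.toNat_natCast] at h7r
          rw [← hother] at h7r
          exact h2 (by omega)

-- the main simulation: A's fold over all remaining columns equals B's fold over the
-- remaining matched columns
theorem fdnMain (origR : List (List Int)) (origD : List Int) (cols : Int) (k : Nat) :
    ∀ (a : Int) (perm pos : List Int) (c : Nat) (L : List Int),
      (cols - a).toNat = k →
      FdnInv origR cols a perm pos c L →
      (PySem.List.pyRange a cols 1).foldl (fdnStepA ((origR.length : Int)))
          (fdnAState origR origD perm c) =
        fdnAState origR origD (L.foldl (fdnStepB (fdnBuckets origR)) (perm, pos, (c : Int))).1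
          ((L.foldl (fdnStepB (fdnBuckets origR)) (perm, pos, (c : Int))).2.2.toNat) := by
  induction k with
  | zero =>
    intro a perm pos c L hk inv
    have hba : cols ≤ a := by omega
    rw [PySem.List.pyRange_one_eq_nil hba]
    have hL : L = [] := by
      cases L with
      | nil => rfl
      | cons e t =>
        obtain ⟨h1, h2, -⟩ := inv.h9 e (List.mem_cons_self)
        omega
    subst hL
    simp only [List.foldl_nil, Int.toNat_natCast]
  | succ k ih =>
    intro a perm pos c L hk inv
    have hacols : a < cols := by omega
    rw [PySem.List.pyRange_one_cons hacols, List.foldl_cons]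
    by_cases hmem : a ∈ L
    · -- a is the next pending column: L = a :: L'
      obtain ⟨L', hL⟩ : ∃ L', L = a :: L' := by
        cases L with
        | nil => exact absurd hmem (List.not_mem_nil)
        | cons e t =>
          rcases List.mem_cons.mp hmem with h | h
          · exact ⟨t, by rw [h]⟩
          · exfalso
            have := (List.pairwise_cons.mp inv.h8).1 a h
            have := (inv.h9 e List.mem_cons_self).1
            omega
      subst hL
      obtain ⟨perm', pos', hB, hA, inv'⟩ := fdnStep_matched origR origD cols a perm pos c L' inv
      rw [hA, List.foldl_cons, hB]
      exact ih (a + 1) perm' pos' (c + 1) L' (by omega) inv'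
    · -- no row starts with column a: A's step is the identity
      rw [fdnStepA_id origR origD cols a perm pos c L inv hmem hacols]
      have inv' : FdnInv origR cols (a + 1) perm pos c L := by
        refine ⟨inv.h1, inv.h2, inv.h3, inv.h4, inv.h5, inv.h6, inv.h7, inv.h8, ?_, ?_⟩
        · intro e he
          obtain ⟨h1, h2, h3⟩ := inv.h9 e he
          have : e ≠ a := fun h => hmem (h ▸ he)
          exact ⟨by omega, h2, h3⟩
        · intro r hrn e hhd hae hecols
          exact inv.h10 r hrn e hhd (by omega) hecols
      exact ih (a + 1) perm pos c L (by omega) inv'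

-- reading back the identity permutation yields the original data prefix
theorem fdnMap_pyRange_take (origD : List Int) (n : Nat) (hn : n ≤ origD.length) :
    (PySem.List.pyRange 0 (n : Int) 1).map (fun r => PySem.List.pyGetD origD r 0) =
      origD.take n := by
  apply List.ext_getElem
  · rw [List.length_map, PySem.List.length_pyRange_one, List.length_take]
    omega
  · intro k h1 h2
    rw [List.getElem_map, PySem.List.getElem_pyRange_one, List.getElem_take]
    rw [show (0 : Int) + (k : Int) = ((k : Nat) : Int) by ring]
    rw [PySem.List.pyGetD_natCast]
    rw [List.getD_eq_getElem _ _ (by simp at h2; omega)]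

-- the initial state of both loops agree and satisfy the invariant
theorem fdnInit_inv (origR : List (List Int)) (cols : Int) :
    FdnInv origR cols 0 (PySem.List.pyRange 0 ((origR.length : Int)) 1)
      (PySem.List.pyRange 0 ((origR.length : Int)) 1) 0
      ((PySem.List.pyRange 0 cols 1).filter
        (fun e => decide (∃ r : Nat, r < origR.length ∧ (origR.getD r []).head? = some e))) := by
  have hlen : (PySem.List.pyRange 0 ((origR.length : Int)) 1).length = origR.length := by
    rw [PySem.List.length_pyRange_one]; omega
  have hget : ∀ p : Nat, p < origR.length →
      (PySem.List.pyRange 0 ((origR.length : Int)) 1).getD p 0 = (p : Int) :=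
    fun p hp => fdnGetD_pyRange _ _ hp
  refine ⟨hlen, hlen, by omega, ?_, ?_, ?_, ?_, ?_, ?_, ?_⟩
  · intro p hp; rw [hget p hp]; omega
  · intro p hp; rw [hget p hp]; simp only [Int.toNat_natCast]; rw [hget p hp]
  · intro r hr; rw [hget r hr]; omega
  · intro r hr; rw [hget r hr]; simp only [Int.toNat_natCast]; rw [hget r hr]
  · exact (PySem.List.pairwise_lt_pyRange_one 0 cols).filter _
  · intro e he
    rw [List.mem_filter, PySem.List.mem_pyRange_one] at he
    exact ⟨he.1.1, he.1.2, by simpa using he.2⟩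
  · intro r hrn e hhd hae hecols
    constructor
    · rw [hget r hrn]; omega
    · rw [List.mem_filter, PySem.List.mem_pyRange_one]
      exact ⟨⟨hae, hecols⟩, by simp; exact ⟨r, hrn, hhd⟩⟩

-- ===== VERDICT (by name: the statement is the Claim_ definition above) =====
theorem fill_diagonal_neighbors_spec : Claim_equal_fill_diagonal_neighbors := by
  unfold Claim_equal_fill_diagonal_neighbors
  intro M cols _hdom hpre
  unfold Pre_fill_diagonal_neighbors at hpre
  unfold Spec_fill_diagonal_neighbors
  unfold fill_diagonal_neighbors fill_diagonal_neighbors_alt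
  simp only [PySem.List.len_eq]
  rw [fdnJs_eq M.1 cols]
  have hinit : ((M.1, M.2, PySem.List.pyRange 0 ((M.1.length : Int)) 1), (0 : Int)) =
      fdnAState M.1 M.2 (PySem.List.pyRange 0 ((M.1.length : Int)) 1) 0 := by
    unfold fdnAState
    have e1 : (PySem.List.pyRange 0 ((M.1.length : Int)) 1).map (fdnRowOf M.1) = M.1 := by
      unfold fdnRowOf
      exact PySem.List.map_pyGetD_pyRange_zero' M.1 []
    have e2 : (PySem.List.pyRange 0 ((M.1.length : Int)) 1).map (fdnDatOf M.2) ++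
        M.2.drop M.1.length = M.2 := by
      unfold fdnDatOf
      rw [fdnMap_pyRange_take M.2 M.1.length hpre]
      exact List.take_append_drop _ _
    rw [e1, e2]
    rfl
  rw [hinit]
  rw [fdnMain M.1 M.2 cols (cols - 0).toNat 0 _ _ 0 _ rfl (fdnInit_inv M.1 cols)]
  rfl
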